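-- pv_equiv track=rewrite | github.com/YuxianMeng/ASTE-Glove-Bert | evaluation_bert.py | find_term
-- ===== SOURCE A (Python) =====
-- def find_term(label_sequence):
--     term = []
--     for i in range(len(label_sequence)):
--         tem_term = []
--         if label_sequence[i] == 1:
--             tem_term.append(i)
--             for j in range(i+1, len(label_sequence)):
--                 if label_sequence[j] == 2 or label_sequence[j] == 1:
--                     tem_term.append(j)
--                 else: break
--         else:continue
--         if tem_term != []:
--             term.append(tem_term)
--     return term
-- ===== SOURCE B (Python) =====
-- def find_term(label_sequence):
--     # Two-pass: build a forward-reach table right-to-left, then emit ranges at each 1.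
--     n = len(label_sequence)
--     reach = [0] * n
--     for i in range(n - 1, -1, -1):
--         if label_sequence[i] == 1 or label_sequence[i] == 2:
--             if i + 1 < n and (label_sequence[i + 1] == 1 or label_sequence[i + 1] == 2):
--                 reach[i] = reach[i + 1]
--             else:
--                 reach[i] = i
--         else:
--             reach[i] = i
--     return [list(range(i, reach[i] + 1)) for i in range(n) if label_sequence[i] == 1]
-- ===== Notes on version B (the rewrite author's own statement) =====
-- stated objective: alternative
-- what changed: Replaces the per-1 forward re-scan with a right-to-left precomputed reach table of segment ends plus a second pass that emits the consecutive index range at each 1.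
import Mathlib
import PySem

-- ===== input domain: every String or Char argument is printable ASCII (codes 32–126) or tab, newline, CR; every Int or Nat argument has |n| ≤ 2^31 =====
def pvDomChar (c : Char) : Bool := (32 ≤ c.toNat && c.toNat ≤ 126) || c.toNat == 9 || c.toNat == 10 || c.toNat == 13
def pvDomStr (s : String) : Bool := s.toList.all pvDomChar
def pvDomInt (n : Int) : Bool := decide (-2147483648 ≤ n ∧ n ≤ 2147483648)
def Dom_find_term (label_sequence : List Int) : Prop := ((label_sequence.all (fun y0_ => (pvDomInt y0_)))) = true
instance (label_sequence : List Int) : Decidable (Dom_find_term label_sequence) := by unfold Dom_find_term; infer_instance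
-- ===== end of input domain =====

-- B replaces A's per-1 forward re-scan by a right-to-left precomputed reach table plus
-- range emission (alternative decomposition, same asymptotic cost).


-- ===== PORT A =====
-- inner `for j in range(i+1, len)` loop with its break, as structural recursion on the index
def innerA (ls : List Int) (j : Nat) : List Int :=
  if _h : j < ls.length then
    if ls.getD j 0 == 2 || ls.getD j 0 == 1 then (j : Int) :: innerA ls (j + 1) else []
  else []
termination_by ls.length - j

def find_term (label_sequence : List Int) : List (List Int) :=
  (List.range label_sequence.length).foldl
    (fun term i =>
      if label_sequence.getD i 0 == 1 then
        let tem_term : List Int := (i : Int) :: innerA label_sequence (i + 1)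
        if tem_term ≠ [] then term ++ [tem_term] else term
      else term) []

-- ===== PORT B =====
def okLab (x : Int) : Bool := x == 1 || x == 2

-- the right-to-left loop building reach[]: reachAux ls i is the table for a suffix whose
-- first element has absolute index i; reach[i+1] is the head of the already-built tail table
def reachAux : List Int → Nat → List Nat
  | [], _ => []
  | x :: rest, i =>
    let r := reachAux rest (i + 1)
    if okLab x && (match rest with | y :: _ => okLab y | [] => false) then
      r.getD 0 0 :: r
    else i :: r

-- list comprehension `[list(range(i, reach[i]+1)) for i in range(n) if ls[i] == 1]` as a foldr;
-- list(range(a, b)) with 0 ≤ a ≤ b ported exactly as (List.range' a (b - a)).map Int.ofNat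
def find_term_alt (label_sequence : List Int) : List (List Int) :=
  let reach := reachAux label_sequence 0
  (List.range label_sequence.length).foldr
    (fun i acc =>
      if label_sequence.getD i 0 == 1 then
        ((List.range' i (reach.getD i 0 + 1 - i)).map Int.ofNat) :: acc
      else acc) []

-- ===== PRECONDITION & SPEC =====
def Spec_find_term (label_sequence : List Int) (out : List (List Int)) : Prop := out = find_term_alt label_sequence
instance (label_sequence : List Int) (out : List (List Int)) : Decidable (Spec_find_term label_sequence out) := by unfold Spec_find_term; infer_instance

-- ===== CLAIM (what is proved, stated in full; the proofs are below) =====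
def Claim_equal_find_term : Prop := ∀ (label_sequence : List Int), Dom_find_term label_sequence → Spec_find_term label_sequence (find_term label_sequence)

-- ===== LEMMAS AND PROOFS =====

theorem reachAux_singleton (x : Int) (i : Nat) : reachAux [x] i = [i] := by
  simp [reachAux]

theorem reachAux_cons_cons (x y : Int) (t : List Int) (i : Nat) :
    reachAux (x :: y :: t) i
      = (if okLab x && okLab y then (reachAux (y :: t) (i + 1)).getD 0 0 else i)
          :: reachAux (y :: t) (i + 1) := by
  by_cases h : (okLab x && okLab y) = true <;> simp [reachAux, h]

theorem reachAux_lower (ls : List Int) (i k : Nat) (hk : k < ls.length) :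
    i + k ≤ (reachAux ls i).getD k 0 := by
  induction ls generalizing i k with
  | nil => simp at hk
  | cons x rest ih =>
    cases rest with
    | nil =>
      obtain rfl : k = 0 := by simp at hk; omega
      simp [reachAux_singleton]
    | cons y t =>
      rw [reachAux_cons_cons]
      cases k with
      | zero =>
        rw [List.getD_cons_zero]
        split
        · exact le_trans (by omega) (ih (i + 1) 0 (by simp))
        · omega
      | succ k =>
        rw [List.getD_cons_succ]
        have := ih (i + 1) k (by simpa using hk)
        omega
  
theorem reachAux_stop (ls : List Int) (i k : Nat) (hk : k < ls.length)
    (h : ¬(okLab (ls.getD k 0) = true ∧ k + 1 < ls.length ∧ okLab (ls.getD (k + 1) 0) = true)) :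
    (reachAux ls i).getD k 0 = i + k := by
  induction ls generalizing i k with
  | nil => simp at hk
  | cons x rest ih =>
    cases rest with
    | nil =>
      obtain rfl : k = 0 := by simp at hk; omega
      simp [reachAux_singleton]
    | cons y t =>
      rw [reachAux_cons_cons]
      cases k with
      | zero =>
        have hc : (okLab x && okLab y) = false := by
          rw [Bool.and_eq_false_iff]
          by_cases hx : okLab x = true
          · right
            by_cases hy : okLab y = true
            · exact absurd ⟨by simpa using hx, by simp, by simpa using hy⟩ h
            · simpa using hy
          · left; simpa using hx
        rw [List.getD_cons_zero, hc]
        simp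
      | succ k =>
        rw [List.getD_cons_succ]
        have h' : ¬(okLab ((y :: t).getD k 0) = true ∧ k + 1 < (y :: t).length ∧
            okLab ((y :: t).getD (k + 1) 0) = true) := by
          intro hc
          exact h ⟨by simpa using hc.1, by simpa using hc.2.1, by simpa using hc.2.2⟩
        have := ih (i + 1) k (by simpa using hk) h'
        omega

theorem reachAux_step (ls : List Int) (i k : Nat) (hk : k < ls.length)
    (h1 : okLab (ls.getD k 0) = true) (h2 : k + 1 < ls.length)
    (h3 : okLab (ls.getD (k + 1) 0) = true) :
    (reachAux ls i).getD k 0 = (reachAux ls i).getD (k + 1) 0 := by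
  induction ls generalizing i k with
  | nil => simp at hk
  | cons x rest ih =>
    cases rest with
    | nil => simp at h2
    | cons y t =>
      rw [reachAux_cons_cons]
      cases k with
      | zero =>
        have hc : (okLab x && okLab y) = true := by
          simp only [Bool.and_eq_true]
          exact ⟨by simpa using h1, by simpa using h3⟩
        rw [List.getD_cons_zero, List.getD_cons_succ, hc]
        simp
      | succ k =>
        rw [List.getD_cons_succ, List.getD_cons_succ]
        exact ih (i + 1) k (by simpa using hk) (by simpa using h1) (by simpa using h2)
          (by simpa using h3)

-- the run emitted by A at a position with an ok label is exactly the range up to reach[k]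
theorem run_eq_range (ls : List Int) (k : Nat) (hk : k < ls.length)
    (hok : okLab (ls.getD k 0) = true) :
    (k : Int) :: innerA ls (k + 1)
      = (List.range' k ((reachAux ls 0).getD k 0 + 1 - k)).map Int.ofNat := by
  by_cases h : k + 1 < ls.length ∧ okLab (ls.getD (k + 1) 0) = true
  · obtain ⟨h2, h3⟩ := h
    have hstep := reachAux_step ls 0 k hk hok h2 h3
    have hlow := reachAux_lower ls 0 (k + 1) h2
    have hIH := run_eq_range ls (k + 1) h2 h3
    have hinner : innerA ls (k + 1) = ((k + 1 : Nat) : Int) :: innerA ls (k + 1 + 1) := by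
      rw [innerA, dif_pos h2, if_pos (by simpa [okLab, Bool.or_comm] using h3)]
    rw [hinner]
    have harith : (reachAux ls 0).getD k 0 + 1 - k
        = ((reachAux ls 0).getD (k + 1) 0 + 1 - (k + 1)) + 1 := by omega
    rw [harith, List.range'_succ, List.map_cons, ← hIH]
    rfl
  · have hstop := reachAux_stop ls 0 k hk (by intro hc; exact h ⟨hc.2.1, hc.2.2⟩)
    have hinner : innerA ls (k + 1) = [] := by
      rw [innerA]
      by_cases h2 : k + 1 < ls.length
      · rw [dif_pos h2, if_neg]
        simp only [not_and, h2, true_implies] at h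
        simpa [okLab, Bool.or_comm] using h
      · rw [dif_neg h2]
    rw [hinner, hstop]
    have : 0 + k + 1 - k = 1 := by omega
    rw [this, List.range'_succ]
    simp
termination_by ls.length - k
decreasing_by omega

theorem foldr_cons_if {α β : Type} (p : α → Bool) (g : α → β) (xs : List α) :
    xs.foldr (fun i acc => if p i then g i :: acc else acc) [] = (xs.filter p).map g := by
  induction xs with
  | nil => rfl
  | cons x xs ih =>
    simp only [List.foldr_cons, List.filter_cons, ih]
    split <;> simp_all

-- ===== VERDICT (by name: the statement is the Claim_ definition above) =====
theorem find_term_spec : Claim_equal_find_term := by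
  intro ls _
  unfold Spec_find_term find_term find_term_alt
  have hA : (fun (term : List (List Int)) (i : Nat) =>
      if ls.getD i 0 == 1 then
        let tem_term : List Int := (i : Int) :: innerA ls (i + 1)
        if tem_term ≠ [] then term ++ [tem_term] else term
      else term)
      = (fun term i => if (ls.getD i 0 == 1) then term ++ [(i : Int) :: innerA ls (i + 1)] else term) := by
    funext term i
    split <;> simp
  rw [hA, PySem.List.foldl_append_if, foldr_cons_if, List.nil_append]
  apply List.map_congr_left
  intro i hi
  rw [List.mem_filter] at hi
  obtain ⟨hmem, hp⟩ := hi
  have hk : i < ls.length := List.mem_range.mp hmem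
  have h1 : ls[i]?.getD 0 = 1 := by simpa [List.getD] using hp
  exact run_eq_range ls i hk (by simp [okLab, List.getD, h1])
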